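-- pv_equiv track=rewrite | github.com/mario-asenjo/call_me_maybe | content_resolver.py | normalize_excludes
-- ===== SOURCE A (Python) =====
-- from typing import Iterable, Set
--
-- def normalize_excludes(raw_excludes: Iterable[str]) -> Set[str]:
--     excludes: Set[str] = set()
--
--     for item in raw_excludes:
--         if not item:
--             continue
--         for part in item.split(","):
--             part = part.strip()
--             if part:
--                 excludes.add(part)
--
--     return excludes
-- ===== SOURCE B (Python) =====
-- def normalize_excludes(raw_excludes):
--     result = set()
--     for item in raw_excludes:
--         buf = ''    # current token (no leading/trailing whitespace)
--         pend = ''   # whitespace seen after buf, pending until a non-space char arrives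
--         for ch in item:
--             if ch == ',':
--                 if buf:
--                     result.add(buf)
--                 buf = ''
--                 pend = ''
--             elif ch.isspace():
--                 if buf:
--                     pend += ch
--             else:
--                 buf += pend + ch
--                 pend = ''
--         if buf:
--             result.add(buf)
--     return result
-- ===== Notes on version B (the rewrite author's own statement) =====
-- stated objective: alternative
-- what changed: B replaces A's split(',')-then-strip pipeline with a single character-level scanner per item that maintains a token buffer and a pending-whitespace buffer, emitting tokens at commas and at end of item; no split or strip call remains.
import Mathlib
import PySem

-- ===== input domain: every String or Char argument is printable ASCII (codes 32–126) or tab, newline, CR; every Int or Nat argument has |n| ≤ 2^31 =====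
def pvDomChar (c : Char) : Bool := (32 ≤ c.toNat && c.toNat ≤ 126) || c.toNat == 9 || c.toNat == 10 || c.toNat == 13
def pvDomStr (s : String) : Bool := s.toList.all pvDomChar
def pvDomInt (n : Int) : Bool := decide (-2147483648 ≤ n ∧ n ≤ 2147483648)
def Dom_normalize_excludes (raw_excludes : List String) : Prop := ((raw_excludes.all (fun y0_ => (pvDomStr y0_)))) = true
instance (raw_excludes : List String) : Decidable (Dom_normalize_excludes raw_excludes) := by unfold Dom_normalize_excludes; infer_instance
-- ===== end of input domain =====

-- B replaces A's split(",")/strip pipeline by a one-pass character scanner with a token buffer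
-- and a pending-whitespace buffer (alternative algorithm, same cost).

-- ===== PORT A =====
-- item.split(",") with the non-empty literal separator ",": split? never returns none, so .getD [] is exact.
def normalize_excludes (raw_excludes : List String) : List String :=
  raw_excludes.foldl (fun excludes item =>
    if item = "" then excludes
    else ((PySem.Str.split? item ",").getD []).foldl (fun excludes part =>
      let part := PySem.Str.strip part
      if part ≠ "" then PySem.Set.add excludes part else excludes) excludes)
    PySem.Set.empty

-- ===== PORT B =====
-- Python str buffers buf/pend are ported as List Char (exact: built by appending single chars).
def scanStep (st : PySem.Set String × List Char × List Char) (c : Char) :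
    PySem.Set String × List Char × List Char :=
  let res := st.1
  let buf := st.2.1
  let pend := st.2.2
  if c = ',' then
    ((if buf ≠ [] then PySem.Set.add res (String.ofList buf) else res), [], [])
  else if PySem.Chars.isspace c then
    (res, buf, if buf ≠ [] then pend ++ [c] else pend)
  else
    (res, buf ++ pend ++ [c], [])

def scanItem (res : PySem.Set String) (item : String) : PySem.Set String :=
  let st := item.toList.foldl scanStep (res, [], [])
  if st.2.1 ≠ [] then PySem.Set.add st.1 (String.ofList st.2.1) else st.1

def normalize_excludes_alt (raw_excludes : List String) : List String :=
  raw_excludes.foldl scanItem PySem.Set.empty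

-- ===== PRECONDITION & SPEC =====
def Spec_normalize_excludes (raw_excludes : List String) (out : List String) : Prop := out = normalize_excludes_alt raw_excludes
instance (raw_excludes : List String) (out : List String) : Decidable (Spec_normalize_excludes raw_excludes out) := by unfold Spec_normalize_excludes; infer_instance

-- ===== CLAIM (what is proved, stated in full; the proofs are below) =====
def Claim_equal_normalize_excludes : Prop := ∀ (raw_excludes : List String), Dom_normalize_excludes raw_excludes → Spec_normalize_excludes raw_excludes (normalize_excludes raw_excludes)

-- ===== LEMMAS AND PROOFS =====

-- Reference single-character splitter: splitc c s = the pieces of s between occurrences of c (empties kept).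
def splitc (c : Char) : List Char → List (List Char)
  | [] => [[]]
  | a :: rest => if a = c then [] :: splitc c rest else (splitc c rest).modifyHead (a :: ·)

theorem splitc_ne_nil (c : Char) (s : List Char) : splitc c s ≠ [] := by
  induction s with
  | nil => simp [splitc]
  | cons a rest ih =>
    simp only [splitc]
    split
    · simp
    · cases h : splitc c rest with
      | nil => exact absurd h ih
      | cons x xs => simp [List.modifyHead]

theorem splitOn_go_eq (c : Char) (fuel : Nat) (l cur : List Char) (acc : List (List Char))
    (h : l.length ≤ fuel) :
    PySem.Chars.splitOn.go [c] fuel l cur acc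
      = acc.reverse ++ (splitc c l).modifyHead (cur.reverse ++ ·) := by
  induction fuel generalizing l cur acc with
  | zero =>
    interval_cases hl : l.length
    rw [List.length_eq_zero_iff] at hl
    subst hl
    simp [PySem.Chars.splitOn.go, splitc, List.modifyHead]
  | succ fuel ih =>
    cases l with
    | nil => simp [PySem.Chars.splitOn.go, splitc, List.modifyHead]
    | cons a rest =>
      simp only [PySem.Chars.splitOn.go]
      by_cases hac : a = c
      · subst hac
        rw [if_pos (by simp [List.isPrefixOf])]
        rw [ih _ _ _ (by simpa using Nat.le_of_succ_le_succ (by simpa using h))]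
        simp only [splitc, List.modifyHead, List.reverse_cons, List.append_assoc,
          List.singleton_append, List.nil_append, List.reverse_nil]
        congr 1
        cases h' : splitc a rest with
        | nil => exact absurd h' (splitc_ne_nil a rest)
        | cons x xs => simp [h']
      · rw [if_neg (by simp [List.isPrefixOf]; exact fun h' => hac h'.symm)]
        rw [ih _ _ _ (by simpa using Nat.le_of_succ_le_succ (by simpa using h))]
        simp only [splitc, if_neg hac]
        congr 1
        cases h' : splitc c rest with
        | nil => exact absurd h' (splitc_ne_nil c rest)
        | cons x xs => simp [List.modifyHead]

theorem splitOn_single (c : Char) (s : List Char) :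
    PySem.Chars.splitOn s [c] = splitc c s := by
  rw [PySem.Chars.splitOn, splitOn_go_eq c _ s [] [] (by omega)]
  cases h : splitc c s with
  | nil => exact absurd h (splitc_ne_nil c s)
  | cons x xs => simp [List.modifyHead]

theorem splitc_append (c : Char) (a b : List Char) :
    splitc c (a ++ c :: b) = splitc c a ++ splitc c b := by
  induction a with
  | nil => simp [splitc]
  | cons x xs ih =>
    simp only [List.cons_append, splitc, ih]
    split
    · rfl
    · cases h : splitc c xs with
      | nil => exact absurd h (splitc_ne_nil c xs)
      | cons y ys => simp [List.modifyHead]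

theorem splitc_no_comma (c : Char) (cs : List Char) (h : c ∉ cs) : splitc c cs = [cs] := by
  induction cs with
  | nil => rfl
  | cons a rest ih =>
    have ha : a ≠ c := fun h' => h (h' ▸ List.mem_cons_self)
    simp only [splitc, if_neg ha, ih (fun h' => h (List.mem_cons_of_mem _ h')), List.modifyHead]

-- The per-item contribution: stripped, non-empty pieces of the comma-split, as A's Str-level code computes them.
def gS (item : String) : List String :=
  (((PySem.Str.split? item ",").getD []).map PySem.Str.strip).filter (fun p => p ≠ "")

-- The same at the Chars level.
def gC (cs : List Char) : List (List Char) :=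
  ((splitc ',' cs).map PySem.Chars.strip).filter (fun p => p ≠ [])

theorem strip_ofList (cs : List Char) :
    PySem.Str.strip (String.ofList cs) = String.ofList (PySem.Chars.strip cs) := by
  simp [PySem.Str.strip, String.toList_ofList]

theorem gS_eq_gC (item : String) : gS item = (gC item.toList).map String.ofList := by
  unfold gS gC
  rw [PySem.Str.split?]
  simp only [PySem.Chars.split?]
  rw [if_neg (by decide), Option.map_some, Option.getD_some]
  rw [show (",").toList = [','] from by decide, splitOn_single]
  rw [List.map_map, show PySem.Str.strip ∘ String.ofList
      = String.ofList ∘ PySem.Chars.strip from funext strip_ofList, ← List.map_map]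
  rw [List.filter_map, List.filter_map]
  congr 1
  rw [List.filter_map]
  congr 1
  congr 1
  funext cs
  simp [Function.comp]

-- A's inner loop over the parts of one item adds exactly gS's values.
theorem inner_foldl_eq (parts : List String) (ex : PySem.Set String) :
    parts.foldl (fun ex part =>
        let part := PySem.Str.strip part
        if part ≠ "" then PySem.Set.add ex part else ex) ex
      = PySem.Set.update ex ((parts.map PySem.Str.strip).filter (fun p => p ≠ "")) := by
  induction parts generalizing ex with
  | nil => rfl
  | cons a t ih =>
    rw [List.foldl_cons, List.map_cons, List.filter_cons]
    by_cases h : PySem.Str.strip a = ""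
    · rw [show (let part := PySem.Str.strip a;
          if part ≠ "" then PySem.Set.add ex part else ex) = ex from by simp [h]]
      rw [ih, if_neg (by simp [h])]
    · rw [show (let part := PySem.Str.strip a;
          if part ≠ "" then PySem.Set.add ex part else ex)
          = PySem.Set.add ex (PySem.Str.strip a) from by simp [h]]
      rw [ih, if_pos (by simp [h])]
      simp only [PySem.Set.update, List.foldl_cons]

-- A's outer loop accumulates the flatMap of gS over the non-empty items.
theorem outer_foldl_eq (raw : List String) (ex : PySem.Set String) :
    raw.foldl (fun excludes item =>
        if item = "" then excludes
        else ((PySem.Str.split? item ",").getD []).foldl (fun excludes part =>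
          let part := PySem.Str.strip part
          if part ≠ "" then PySem.Set.add excludes part else excludes) excludes) ex
      = PySem.Set.update ex (((raw.filter (fun x => x ≠ "")).flatMap gS)) := by
  induction raw generalizing ex with
  | nil => rfl
  | cons a t ih =>
    rw [List.foldl_cons, List.filter_cons]
    by_cases h : a = ""
    · rw [if_pos h, if_neg (by simp [h]), ih]
    · rw [if_neg h, if_pos (by simp [h]), inner_foldl_eq, ih, List.flatMap_cons]
      rw [show ((((PySem.Str.split? a ",").getD []).map PySem.Str.strip).filter (fun p => p ≠ ""))
            = gS a from rfl]
      simp only [PySem.Set.update, List.foldl_append]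

theorem update_append (s : PySem.Set String) (l1 l2 : List String) :
    PySem.Set.update s (l1 ++ l2) = PySem.Set.update (PySem.Set.update s l1) l2 := by
  simp only [PySem.Set.update, List.foldl_append]

-- ---- B-side: the character scanner computes the same tokens ----

-- trailing whitespace of a list
def tws (l : List Char) : List Char := (l.reverse.takeWhile PySem.Chars.isspace).reverse

theorem dropWhile_append_cons (p : Char → Bool) (c : Char) (hc : p c = false)
    (xs ys : List Char) : (xs ++ c :: ys).dropWhile p = xs.dropWhile p ++ c :: ys := by
  induction xs with
  | nil => simp [List.dropWhile, hc]
  | cons x t ih =>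
    by_cases hx : p x
    · simp [List.dropWhile, hx, ih]
    · simp [List.dropWhile, hx]

theorem takeWhile_append_cons (p : Char → Bool) (c : Char) (hc : p c = false)
    (xs ys : List Char) : (xs ++ c :: ys).takeWhile p = xs.takeWhile p := by
  induction xs with
  | nil => simp [List.takeWhile, hc]
  | cons x t ih =>
    by_cases hx : p x
    · simp [List.takeWhile, hx, ih]
    · simp [List.takeWhile, hx]

theorem rstrip_append_cons (c : Char) (hc : PySem.Chars.isspace c = false)
    (l1 l2 : List Char) : PySem.Chars.rstrip (l1 ++ c :: l2) = l1 ++ c :: PySem.Chars.rstrip l2 := by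
  unfold PySem.Chars.rstrip
  rw [show (l1 ++ c :: l2).reverse = l2.reverse ++ c :: l1.reverse from by simp]
  rw [dropWhile_append_cons _ _ hc]
  simp

theorem tws_append_cons (c : Char) (hc : PySem.Chars.isspace c = false)
    (l1 l2 : List Char) : tws (l1 ++ c :: l2) = tws l2 := by
  unfold tws
  rw [show (l1 ++ c :: l2).reverse = l2.reverse ++ c :: l1.reverse from by simp]
  rw [takeWhile_append_cons _ _ hc]

theorem rstrip_all_ws (l : List Char) (h : ∀ x ∈ l, PySem.Chars.isspace x = true) :
    PySem.Chars.rstrip l = [] := by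
  unfold PySem.Chars.rstrip
  rw [List.reverse_eq_nil_iff, List.dropWhile_eq_nil_iff]
  intro x hx
  exact h x (List.mem_reverse.mp hx)

theorem tws_all_ws (l : List Char) (h : ∀ x ∈ l, PySem.Chars.isspace x = true) :
    tws l = l := by
  unfold tws
  rw [List.takeWhile_eq_self_iff.mpr (fun x hx => h x (List.mem_reverse.mp hx))]
  simp

-- scanner over a comma-free tail, once the buffer is non-empty
theorem scan_run (cs : List Char) (hcs : ',' ∉ cs) :
    ∀ (res : PySem.Set String) (buf pend : List Char), buf ≠ [] →
      (∀ x ∈ pend, PySem.Chars.isspace x = true) →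
      cs.foldl scanStep (res, buf, pend)
        = (res, buf ++ PySem.Chars.rstrip (pend ++ cs), tws (pend ++ cs)) := by
  induction cs with
  | nil =>
    intro res buf pend hbuf hpend
    simp [rstrip_all_ws pend hpend, tws_all_ws pend hpend]
  | cons c rest ih =>
    intro res buf pend hbuf hpend
    have hcr : ',' ∉ rest := fun h => hcs (List.mem_cons_of_mem _ h)
    have hc : c ≠ ',' := fun h => hcs (h ▸ List.mem_cons_self)
    rw [List.foldl_cons]
    by_cases hw : PySem.Chars.isspace c
    · rw [show scanStep (res, buf, pend) c = (res, buf, pend ++ [c]) from by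
        simp [scanStep, hc, hw, hbuf]]
      rw [ih hcr res buf (pend ++ [c]) hbuf (by
        intro x hx
        rcases List.mem_append.mp hx with h1 | h1
        · exact hpend x h1
        · simpa [List.mem_singleton.mp h1] using hw)]
      simp
    · rw [show scanStep (res, buf, pend) c = (res, buf ++ pend ++ [c], []) from by
        simp [scanStep, hc, hw]]
      rw [ih hcr res (buf ++ pend ++ [c]) [] (by simp) (by simp)]
      rw [rstrip_append_cons c (by simpa using hw) pend rest,
          tws_append_cons c (by simpa using hw) pend rest]
      simp

theorem scan_ws (cs : List Char) (h : ∀ x ∈ cs, PySem.Chars.isspace x = true) :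
    ∀ res : PySem.Set String, cs.foldl scanStep (res, [], []) = (res, [], []) := by
  induction cs with
  | nil => intro res; rfl
  | cons c rest ih =>
    intro res
    have hw : PySem.Chars.isspace c = true := h c List.mem_cons_self
    have hc : c ≠ ',' := by intro h'; rw [h'] at hw; exact absurd hw (by decide)
    rw [List.foldl_cons, show scanStep (res, [], []) c = (res, [], []) from by
      simp [scanStep, hc, hw]]
    exact ih (fun x hx => h x (List.mem_cons_of_mem _ hx)) res

theorem head_dropWhile_false (p : Char → Bool) (l : List Char) (c : Char) (t : List Char)
    (h : l.dropWhile p = c :: t) : p c = false := by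
  induction l with
  | nil => simp [List.dropWhile] at h
  | cons x xs ih =>
    by_cases hx : p x
    · exact ih (by simpa [List.dropWhile, hx] using h)
    · rw [List.dropWhile_cons_of_neg hx] at h
      cases h
      simpa using hx

-- scanner over one whole comma-free chunk from the reset state
theorem scan_chunk (cs : List Char) (h : ',' ∉ cs) (res : PySem.Set String) :
    cs.foldl scanStep (res, [], [])
      = (res, PySem.Chars.strip cs, tws (PySem.Chars.lstrip cs)) := by
  have hsplit := List.takeWhile_append_dropWhile (p := PySem.Chars.isspace) (l := cs)
  conv_lhs => rw [← hsplit]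
  rw [List.foldl_append, scan_ws _ (fun x hx => List.mem_takeWhile_imp hx) res]
  show _ = (res, PySem.Chars.rstrip (cs.dropWhile PySem.Chars.isspace),
    tws (cs.dropWhile PySem.Chars.isspace))
  cases hd : cs.dropWhile PySem.Chars.isspace with
  | nil => simp [PySem.Chars.rstrip, tws]
  | cons c rest =>
    have hcws : PySem.Chars.isspace c = false := head_dropWhile_false _ _ _ _ hd
    have hmem : ∀ x ∈ c :: rest, x ∈ cs := by
      intro x hx; rw [← hd] at hx; exact List.Sublist.mem hx (List.dropWhile_sublist _)
    have hc : c ≠ ',' := fun h' => h (h' ▸ hmem c List.mem_cons_self)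
    have hcr : ',' ∉ rest := fun h' => h (hmem ',' (List.mem_cons_of_mem _ h'))
    rw [List.foldl_cons, show scanStep (res, [], []) c = (res, [c], []) from by
      simp [scanStep, hc, hcws]]
    rw [scan_run rest hcr res [c] [] (by simp) (by simp)]
    rw [show ([] : List Char) ++ rest = rest from rfl]
    rw [show PySem.Chars.rstrip (c :: rest) = [] ++ c :: PySem.Chars.rstrip rest from
      rstrip_append_cons c hcws [] rest]
    rw [show tws (c :: rest) = tws rest from tws_append_cons c hcws [] rest]
    simp

theorem strip_nil_eq : PySem.Chars.strip [] = [] := by decide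

-- full scanner + final flush = update with the stripped non-empty comma-pieces
theorem scan_tokens (n : Nat) : ∀ cs : List Char, cs.length ≤ n → ∀ res : PySem.Set String,
    (let st := cs.foldl scanStep (res, [], []);
     if st.2.1 ≠ [] then PySem.Set.add st.1 (String.ofList st.2.1) else st.1)
      = PySem.Set.update res ((gC cs).map String.ofList) := by
  induction n with
  | zero =>
    intro cs hlen res
    rw [List.length_eq_zero_iff.mp (Nat.le_zero.mp hlen)]
    simp [gC, splitc, strip_nil_eq, PySem.Set.update]
  | succ n ih =>
    intro cs hlen res
    by_cases hc : ',' ∈ cs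
    · obtain ⟨a, b, ha, hab⟩ : ∃ a b, ',' ∉ a ∧ cs = a ++ ',' :: b := by
        cases hd : cs.dropWhile (fun x => !(x == ',')) with
        | nil =>
          exfalso
          have := List.takeWhile_append_dropWhile (p := fun x => !(x == ',')) (l := cs)
          rw [hd, List.append_nil] at this
          rw [← this] at hc
          have := List.mem_takeWhile_imp hc
          simp at this
        | cons c0 t =>
          have hc0 : c0 = ',' := by
            have := head_dropWhile_false _ _ _ _ hd
            simpa using this
          refine ⟨cs.takeWhile (fun x => !(x == ',')), t, ?_, ?_⟩
          · intro h'
            have := List.mem_takeWhile_imp h'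
            simp at this
          · have hsp := List.takeWhile_append_dropWhile (p := fun x => !(x == ',')) (l := cs)
            rw [hd, hc0] at hsp
            exact hsp.symm
      have hblen : b.length ≤ n := by
        have := congrArg List.length hab
        simp at this
        omega
      rw [hab, List.foldl_append, scan_chunk a ha res, List.foldl_cons]
      rw [show scanStep (res, PySem.Chars.strip a, tws (PySem.Chars.lstrip a)) ','
            = ((if PySem.Chars.strip a ≠ [] then
                  PySem.Set.add res (String.ofList (PySem.Chars.strip a)) else res), [], []) from by
        simp [scanStep]]
      rw [ih b hblen]
      rw [show gC (a ++ ',' :: b) = ((gC a) ++ gC b) from by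
        unfold gC
        rw [splitc_append, splitc_no_comma ',' a ha, List.map_append, List.filter_append]]
      rw [List.map_append, update_append]
      congr 1
      rw [show gC a = (if PySem.Chars.strip a = [] then [] else [PySem.Chars.strip a]) from by
        unfold gC
        rw [splitc_no_comma ',' a ha]
        by_cases hs : PySem.Chars.strip a = [] <;> simp [hs]]
      by_cases hs : PySem.Chars.strip a = []
      · simp [hs, PySem.Set.update]
      · simp [hs, PySem.Set.update]
    · rw [scan_chunk cs hc res]
      rw [show gC cs = (if PySem.Chars.strip cs = [] then [] else [PySem.Chars.strip cs]) from by
        unfold gC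
        rw [splitc_no_comma ',' cs hc]
        by_cases hs : PySem.Chars.strip cs = [] <;> simp [hs]]
      by_cases hs : PySem.Chars.strip cs = []
      · simp [hs, PySem.Set.update]
      · simp [hs, PySem.Set.update]

theorem scanItem_eq (res : PySem.Set String) (item : String) :
    scanItem res item = PySem.Set.update res (gS item) := by
  unfold scanItem
  rw [gS_eq_gC]
  exact scan_tokens item.toList.length item.toList le_rfl res

theorem alt_foldl_eq (raw : List String) (res : PySem.Set String) :
    raw.foldl scanItem res = PySem.Set.update res (raw.flatMap gS) := by
  induction raw generalizing res with
  | nil => rfl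
  | cons a t ih =>
    rw [List.foldl_cons, scanItem_eq, ih, List.flatMap_cons, update_append]

theorem gS_empty : gS "" = [] := by decide

theorem filter_flatMap_gS (raw : List String) :
    (raw.filter (fun x => x ≠ "")).flatMap gS = raw.flatMap gS := by
  induction raw with
  | nil => rfl
  | cons a t ih =>
    rw [List.filter_cons, List.flatMap_cons]
    by_cases h : a = ""
    · rw [if_neg (by simp [h]), ih, h, gS_empty, List.nil_append]
    · rw [if_pos (by simp [h]), List.flatMap_cons, ih]

-- ===== VERDICT (by name: the statement is the Claim_ definition above) =====
theorem normalize_excludes_spec : Claim_equal_normalize_excludes := by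
  intro raw _
  unfold Spec_normalize_excludes normalize_excludes normalize_excludes_alt
  rw [outer_foldl_eq, filter_flatMap_gS, alt_foldl_eq]
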